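-- pv_equiv track=rewrite | github.com/ammoun/codechallenge_extra | redundantletters.py | omitredundant
-- ===== SOURCE A (Python) =====
-- import string
--
-- def isPunctuation(str):
-- 	return all(x in string.punctuation for x in str)
--
-- def omitredundant(str):
-- 	if not isPunctuation(str):
-- 		candidates = [""]
-- 		i= 0
-- 		while i < len(str):
-- 			#There is triple or more of the same character
-- 			if (i<len(str)-2 and str[i] == str[i+1] == str[i+2]):
--
-- 					#go through the list of candidates and add that letter to every entry
-- 					for j,x in enumerate(candidates):
-- 						candidates[j] += str[i]
--
-- 					#make new entries for the double letter version
-- 					for j,x in enumerate(list(candidates)):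
-- 						candidates.append(candidates[j] + str[i])
--
-- 					#advance the pointer of the string until it finds a different letter of the end of the string
-- 					while (i < len(str) -1 and str[i] == str[i+1]):
-- 						i += 1
-- 			else:
-- 				#single occurence just append it to all the elements of the list.
-- 				for j,x in enumerate(candidates):
-- 					candidates[j] += str[i]
--
-- 			i +=1
-- 		return candidates
--
-- 	#all characters are ponctuation
-- 	else:
-- 		return [str]
-- ===== SOURCE B (Python) =====
-- import string
--
-- def omitredundant(str):
--     if all(c in string.punctuation for c in str):
--         return [str]
--     # run-length grouping: (char, count) pairs for maximal runs
--     runs = []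
--     for c in str:
--         if runs and runs[-1][0] == c:
--             runs[-1][1] += 1
--         else:
--             runs.append([c, 1])
--     candidates = [""]
--     for ch, n in runs:
--         opts = [ch, ch * 2] if n >= 3 else [ch * n]
--         candidates = [c + o for o in opts for c in candidates]
--     return candidates
-- ===== Notes on version B (the rewrite author's own statement) =====
-- stated objective: simpler
-- what changed: Replaces A's index-based while-loop with in-place candidate mutation and an inner run-skipping while by a run-length grouping pass into (char,count) pairs followed by a fold that extends all candidates with the option list of each run.
import Mathlib
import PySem

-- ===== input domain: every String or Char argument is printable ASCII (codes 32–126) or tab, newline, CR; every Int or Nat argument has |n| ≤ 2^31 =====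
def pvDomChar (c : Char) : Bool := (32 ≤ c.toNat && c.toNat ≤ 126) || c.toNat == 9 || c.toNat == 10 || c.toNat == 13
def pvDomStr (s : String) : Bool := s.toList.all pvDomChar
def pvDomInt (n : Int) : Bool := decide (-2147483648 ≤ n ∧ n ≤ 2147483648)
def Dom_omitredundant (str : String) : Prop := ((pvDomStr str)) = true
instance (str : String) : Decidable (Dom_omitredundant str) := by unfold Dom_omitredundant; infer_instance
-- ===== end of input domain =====

-- B replaces A's index-juggling while-loop (with its inner run-skipping while) by a
-- run-length grouping pass followed by a fold over the runs (objective: simpler).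

-- string.punctuation
def pvPunct : List Char := "!\"#$%&'()*+,-./:;<=>?@[\\]^_`{|}~".toList

-- ===== PORT A =====
def isPunctuation (s : String) : Bool := s.toList.all (fun c => pvPunct.contains c)

-- A's while-loop: the index i becomes the suffix of the string starting at i;
-- the inner 'advance past the run' while-loop becomes dropWhile (· == c).
def loopA : List Char → List String → List String
  | [], cands => cands
  | [c], cands => loopA [] (cands.map (fun s => s ++ String.ofList [c]))
  | c :: c1 :: rest2, cands =>
    if h : c = c1 ∧ rest2.head? = some c1 then
      let cands1 := cands.map (fun s => s ++ String.ofList [c])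
      loopA ((c1 :: rest2).dropWhile (· == c)) (cands1 ++ cands1.map (fun s => s ++ String.ofList [c]))
    else
      loopA (c1 :: rest2) (cands.map (fun s => s ++ String.ofList [c]))
  termination_by l _ => l.length
  decreasing_by
    · simp
    · obtain ⟨h1, h2⟩ := h
      subst h1
      simp only [List.dropWhile_cons, beq_self_eq_true, if_true, List.length_cons]
      have := List.length_dropWhile_le (fun x => x == c) rest2
      omega
    · simp
def omitredundant (str : String) : List String :=
  if isPunctuation str then [str] else loopA str.toList [""]

-- ===== PORT B =====
-- run-length grouping built left to right, as in Source B's loop over the characters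
def addRun (runs : List (Char × Nat)) (c : Char) : List (Char × Nat) :=
  match runs.getLast? with
  | some (c0, n) => if c0 = c then runs.dropLast ++ [(c0, n + 1)] else runs ++ [(c, 1)]
  | none => [(c, 1)]

-- one step of Source B's fold over the runs
def stepB (cands : List String) (r : Char × Nat) : List String :=
  let opts := if r.2 ≥ 3 then [String.ofList [r.1], String.ofList [r.1, r.1]]
              else [String.ofList (List.replicate r.2 r.1)]
  opts.flatMap (fun o => cands.map (fun cnd => cnd ++ o))

def omitredundant_alt (str : String) : List String :=
  if str.toList.all (fun c => pvPunct.contains c) then [str]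
  else (str.toList.foldl addRun []).foldl stepB [""]

-- ===== PRECONDITION & SPEC =====
def Spec_omitredundant (str : String) (out : List String) : Prop := out = omitredundant_alt str
instance (str : String) (out : List String) : Decidable (Spec_omitredundant str out) := by unfold Spec_omitredundant; infer_instance

-- ===== CLAIM (what is proved, stated in full; the proofs are below) =====
def Claim_equal_omitredundant : Prop := ∀ (str : String), Dom_omitredundant str → Spec_omitredundant str (omitredundant str)

-- ===== LEMMAS AND PROOFS =====

-- runs of a list computed front-to-back: proof-side normal form shared by both sides
def runsFront : List Char → List (Char × Nat)
  | [] => []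
  | c :: rest => (c, 1 + (rest.takeWhile (· == c)).length) :: runsFront (rest.dropWhile (· == c))
  termination_by l => l.length
  decreasing_by simp; exact List.length_dropWhile_le _ _

theorem runsFront_nil : runsFront [] = [] := by rw [runsFront]

theorem runsFront_cons (c : Char) (rest : List Char) :
    runsFront (c :: rest) =
      (c, 1 + (rest.takeWhile (· == c)).length) :: runsFront (rest.dropWhile (· == c)) := by
  rw [runsFront]

theorem loopA_nil (cands : List String) : loopA [] cands = cands := by rw [loopA]

theorem loopA_one (c : Char) (cands : List String) :
    loopA [c] cands = cands.map (fun s => s ++ String.ofList [c]) := by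
  rw [loopA, loopA]

theorem foldl_addRun (xs : List Char) : ∀ (rs : List (Char × Nat)) (c : Char) (n : Nat),
    xs.foldl addRun (rs ++ [(c, n)]) =
      rs ++ (c, n + (xs.takeWhile (· == c)).length) :: runsFront (xs.dropWhile (· == c)) := by
  induction xs with
  | nil => intro rs c n; simp [runsFront_nil]
  | cons x xs ih =>
    intro rs c n
    by_cases hx : x = c
    · subst hx
      have h1 : addRun (rs ++ [(x, n)]) x = rs ++ [(x, n + 1)] := by simp [addRun]
      simp only [List.foldl_cons, h1, ih, List.takeWhile_cons, List.dropWhile_cons]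
      simp; omega
    · have hcx : ¬ c = x := fun h => hx h.symm
      have h1 : addRun (rs ++ [(c, n)]) x = (rs ++ [(c, n)]) ++ [(x, 1)] := by
        simp [addRun, hcx]
      simp only [List.foldl_cons, h1, ih]
      simp [List.takeWhile_cons, List.dropWhile_cons, hx, runsFront_cons]

theorem foldl_addRun_nil (l : List Char) : l.foldl addRun [] = runsFront l := by
  cases l with
  | nil => simp [runsFront_nil]
  | cons c rest =>
    have h1 : addRun [] c = [(c, 1)] := by simp [addRun]
    have h2 := foldl_addRun rest [] c 1
    rw [List.foldl_cons, h1, runsFront_cons]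
    simpa [Nat.add_comm] using h2

theorem append_ofList_ofList (s : String) (a b : List Char) :
    (s ++ String.ofList a) ++ String.ofList b = s ++ String.ofList (a ++ b) := by
  apply String.toList_injective
  simp

theorem stepB_one (cands : List String) (c : Char) :
    stepB cands (c, 1) = cands.map (fun s => s ++ String.ofList [c]) := by
  simp [stepB, List.flatMap]

theorem stepB_two (cands : List String) (c : Char) :
    stepB cands (c, 2) =
      (cands.map (fun s => s ++ String.ofList [c])).map (fun s => s ++ String.ofList [c]) := by
  simp only [stepB, List.map_map]
  simp [List.flatMap, Function.comp]
  intro s _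
  exact (append_ofList_ofList s [c] [c]).symm

theorem stepB_big (cands : List String) (c : Char) (k : Nat) (hk : 3 ≤ k) :
    stepB cands (c, k) =
      cands.map (fun s => s ++ String.ofList [c]) ++
        (cands.map (fun s => s ++ String.ofList [c])).map (fun s => s ++ String.ofList [c]) := by
  simp only [stepB, List.map_map]
  simp [List.flatMap, hk, Function.comp]
  intro s _
  exact (append_ofList_ofList s [c] [c]).symm

theorem loopA_eq_aux : ∀ (n : Nat) (l : List Char), l.length ≤ n →
    ∀ cands, loopA l cands = (runsFront l).foldl stepB cands := by
  intro n
  induction n with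
  | zero =>
    intro l hl cands
    have : l = [] := List.length_eq_zero_iff.mp (Nat.le_zero.mp hl)
    subst this; simp [loopA_nil, runsFront_nil]
  | succ n ih =>
    intro l hl cands
    match l with
    | [] => simp [loopA_nil, runsFront_nil]
    | [c] =>
      rw [loopA_one, runsFront_cons]
      simp [runsFront_nil, stepB_one]
    | c :: c1 :: rest2 =>
      by_cases hcc : c = c1
      · subst hcc
        by_cases hh : rest2.head? = some c
        · -- run of length ≥ 3
          obtain ⟨t, ht⟩ : ∃ t, rest2 = c :: t := by
            cases rest2 with
            | nil => simp at hh
            | cons d t => simp at hh; exact ⟨t, by rw [hh]⟩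
          subst ht
          rw [loopA, dif_pos ⟨rfl, rfl⟩, runsFront_cons]
          simp only [List.takeWhile_cons, List.dropWhile_cons, beq_self_eq_true, if_true]
          rw [ih _ (by
            have h1 := List.length_dropWhile_le (fun x => x == c) t
            simp at hl ⊢; omega)]
          rw [List.foldl_cons]
          congr 1
          rw [stepB_big _ _ _ (by simp; omega)]
        · -- run of length exactly 2
          have hdw : rest2.dropWhile (· == c) = rest2 := by
            cases rest2 with
            | nil => simp
            | cons d t =>
              have hd : ¬ d = c := by intro h; subst h; simp at hh
              simp [List.dropWhile_cons, hd]
          have htw : rest2.takeWhile (· == c) = [] := by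
            cases rest2 with
            | nil => simp
            | cons d t =>
              have hd : ¬ d = c := by intro h; subst h; simp at hh
              simp [List.takeWhile_cons, hd]
          rw [loopA, dif_neg (by intro h; exact hh h.2), runsFront_cons]
          simp only [List.takeWhile_cons, List.dropWhile_cons, beq_self_eq_true, if_true,
            htw, hdw, List.length_cons, List.length_nil, List.foldl_cons]
          rw [stepB_two]
          cases rest2 with
          | nil =>
            rw [loopA_one, runsFront_nil]
            simp
          | cons d t =>
            have hd : ¬ d = c := by intro h; subst h; simp at hh
            rw [loopA, dif_neg (by intro h; exact hd h.1.symm)]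
            rw [ih _ (by simp at hl ⊢; omega)]
      · -- run of length 1
        have hc1 : ¬ c1 = c := fun h => hcc h.symm
        rw [loopA, dif_neg (by intro h; exact hcc h.1), runsFront_cons]
        simp only [List.takeWhile_cons, List.dropWhile_cons]
        rw [if_neg (by simp [hc1]), if_neg (by simp [hc1])]
        rw [ih _ (by simp at hl ⊢; omega)]
        simp only [List.length_nil, Nat.add_zero]
        rw [List.foldl_cons, stepB_one]

theorem loopA_eq (l : List Char) (cands : List String) :
    loopA l cands = (runsFront l).foldl stepB cands :=
  loopA_eq_aux l.length l (Nat.le_refl _) cands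

-- ===== VERDICT (by name: the statement is the Claim_ definition above) =====
theorem omitredundant_spec : Claim_equal_omitredundant := by
  intro str _
  unfold Spec_omitredundant omitredundant omitredundant_alt isPunctuation
  by_cases h : (str.toList.all fun c => pvPunct.contains c) = true
  · rw [if_pos h, if_pos h]
  · rw [if_neg h, if_neg h, loopA_eq, foldl_addRun_nil]
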